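-- pv_equiv track=rewrite | github.com/StormyRabbit/InternetProgrammering | gesallprov/model/exporters.py | _build_dictionary
-- ===== SOURCE A (Python) =====
-- def _build_dictionary(tcp_results, udp_results):
--     ret_struct = {'tcp': {}, 'udp': {}}
--     for row in tcp_results:
--         ret_struct['tcp'][row[0]] = {'open_ports': []}
--     for row in tcp_results:
--         ret_struct['tcp'][row[0]]['open_ports'].append(row[1])
--     for row in udp_results:
--         ret_struct['udp'][row[0]] = {'open_ports': []}
--     for row in udp_results:
--         ret_struct['udp'][row[0]]['open_ports'].append(row[1])
--     return ret_struct
-- ===== SOURCE B (Python) =====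
-- def _build_dictionary(tcp_results, udp_results):
--     def group(rows):
--         hosts = list(dict.fromkeys(host for host, _ in rows))
--         return {h: {'open_ports': [p for hh, p in rows if hh == h]} for h in hosts}
--     return {'tcp': group(tcp_results), 'udp': group(udp_results)}
-- ===== Notes on version B (the rewrite author's own statement) =====
-- stated objective: alternative
-- what changed: Instead of A's two passes per protocol over a mutable dict (initialize every host's entry, then append ports), B first dedups the host names in first-occurrence order and then builds each host's port list directly with a filter over the rows.
import Mathlib
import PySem

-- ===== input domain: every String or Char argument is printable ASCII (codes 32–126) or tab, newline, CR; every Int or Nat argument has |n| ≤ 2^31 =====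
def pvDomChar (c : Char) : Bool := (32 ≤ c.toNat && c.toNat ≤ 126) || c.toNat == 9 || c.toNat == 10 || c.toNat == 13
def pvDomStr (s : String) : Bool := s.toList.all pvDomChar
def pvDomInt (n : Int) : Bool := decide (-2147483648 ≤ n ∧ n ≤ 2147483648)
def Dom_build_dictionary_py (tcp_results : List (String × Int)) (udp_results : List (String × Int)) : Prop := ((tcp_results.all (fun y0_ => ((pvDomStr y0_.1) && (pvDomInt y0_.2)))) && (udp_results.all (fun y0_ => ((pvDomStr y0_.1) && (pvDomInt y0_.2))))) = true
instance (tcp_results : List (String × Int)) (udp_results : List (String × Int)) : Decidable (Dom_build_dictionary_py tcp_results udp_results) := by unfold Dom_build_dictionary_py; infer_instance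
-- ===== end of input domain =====

-- B replaces A's two passes per protocol (init every host entry, then append ports) by
-- deduping the hosts once and building each host's port list with a filter (objective: alternative).

-- ===== PORT A =====
-- the fresh {'open_ports': []} value A inserts in its first pass
def pvEmptyEntry : PySem.Dict String (List Int) := PySem.Dict.ofList [("open_ports", ([] : List Int))]

-- first loop per protocol: ret_struct[proto][row[0]] = {'open_ports': []}
def pvInitA (rs : List (String × Int)) (d : PySem.Dict String (PySem.Dict String (List Int))) :
    PySem.Dict String (PySem.Dict String (List Int)) :=
  rs.foldl (fun d r => d.insert r.1 pvEmptyEntry) d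

-- second loop per protocol: ret_struct[proto][row[0]]['open_ports'].append(row[1])
def pvFillA (rs : List (String × Int)) (d : PySem.Dict String (PySem.Dict String (List Int))) :
    PySem.Dict String (PySem.Dict String (List Int)) :=
  rs.foldl (fun d r => d.modify r.1 PySem.Dict.empty
    (fun inner => inner.modify "open_ports" [] (fun ps => ps ++ [r.2]))) d

-- render the nested dicts into the association-list return type
def pvItemsA (d : PySem.Dict String (PySem.Dict String (List Int))) : List (String × List (String × List Int)) :=
  d.items.map (fun p => (p.1, p.2.items))

def build_dictionary_py (tcp_results : List (String × Int)) (udp_results : List (String × Int)) : List (String × List (String × List (String × List Int))) :=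
  [("tcp", pvItemsA (pvFillA tcp_results (pvInitA tcp_results PySem.Dict.empty))),
   ("udp", pvItemsA (pvFillA udp_results (pvInitA udp_results PySem.Dict.empty)))]

-- ===== PORT B =====
-- hosts = list(dict.fromkeys(...)); {h: {'open_ports': [p for hh, p in rows if hh == h]} for h in hosts}
def pvGroupB (rows : List (String × Int)) : List (String × List (String × List Int)) :=
  (PySem.List.dedup (rows.map (fun r => r.1))).map
    (fun h => (h, [("open_ports", (rows.filter (fun r => r.1 == h)).map (fun r => r.2))]))

def build_dictionary_py_alt (tcp_results : List (String × Int)) (udp_results : List (String × Int)) : List (String × List (String × List (String × List Int))) :=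
  [("tcp", pvGroupB tcp_results), ("udp", pvGroupB udp_results)]

-- ===== PRECONDITION & SPEC =====
def Spec_build_dictionary_py (tcp_results : List (String × Int)) (udp_results : List (String × Int)) (out : List (String × List (String × List (String × List Int)))) : Prop := out = build_dictionary_py_alt tcp_results udp_results
instance (tcp_results : List (String × Int)) (udp_results : List (String × Int)) (out : List (String × List (String × List (String × List Int)))) : Decidable (Spec_build_dictionary_py tcp_results udp_results out) := by
  unfold Spec_build_dictionary_py
  -- build the deeply nested DecidableEq step by step (one-shot synthesis exceeds the search limit)
  letI d1 : DecidableEq (String × List Int) := inferInstance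
  letI d2 : DecidableEq (List (String × List Int)) := inferInstance
  letI d3 : DecidableEq (String × List (String × List Int)) := inferInstance
  letI d4 : DecidableEq (List (String × List (String × List Int))) := inferInstance
  letI d5 : DecidableEq (String × List (String × List (String × List Int))) := inferInstance
  infer_instance

-- ===== CLAIM (what is proved, stated in full; the proofs are below) =====
def Claim_equal_build_dictionary_py : Prop := ∀ (tcp_results : List (String × Int)) (udp_results : List (String × Int)), Dom_build_dictionary_py tcp_results udp_results → Spec_build_dictionary_py tcp_results udp_results (build_dictionary_py tcp_results udp_results)

-- ===== LEMMAS AND PROOFS =====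

theorem pvOfList_entry (x : List Int) :
    PySem.Dict.ofList [("open_ports", x)] = PySem.Dict.mk [("open_ports", x)] := rfl

-- the init pass sets every host occurring in rs to the empty entry and leaves the rest alone
theorem pvInitA_getD (rs : List (String × Int)) (d : PySem.Dict String (PySem.Dict String (List Int))) (h : String) :
    (pvInitA rs d).getD h PySem.Dict.empty =
      if h ∈ rs.map (fun r => r.1) then pvEmptyEntry else d.getD h PySem.Dict.empty := by
  induction rs generalizing d with
  | nil => simp [pvInitA]
  | cons r rs ih =>
      simp only [pvInitA, List.foldl_cons] at *
      rw [ih]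
      by_cases hm : h ∈ rs.map (fun r => r.1)
      · simp [hm]
      · rw [PySem.Dict.getD_insert]
        by_cases he : h = r.1 <;> simp [hm, he]

-- the fill pass applies, at each host h, the append loop over exactly the ports of h's rows
theorem pvFillA_getD (rs : List (String × Int)) (d : PySem.Dict String (PySem.Dict String (List Int))) (h : String) :
    (pvFillA rs d).getD h PySem.Dict.empty =
      ((rs.filter (fun r => r.1 == h)).map (fun r => r.2)).foldl
        (fun inner p => inner.modify "open_ports" [] (fun ps => ps ++ [p]))
        (d.getD h PySem.Dict.empty) := by
  induction rs generalizing d with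
  | nil => simp [pvFillA]
  | cons r rs ih =>
      simp only [pvFillA, List.foldl_cons, List.filter_cons] at *
      rw [ih]
      by_cases he : r.1 = h
      · rw [PySem.Dict.getD_modify]; simp [he]
      · have hb : (r.1 == h) = false := by simp [he]
        rw [PySem.Dict.getD_modify]
        simp [hb, Ne.symm he]

-- appending ports one by one into {'open_ports': x} yields {'open_ports': x ++ ps}
theorem pvEntry_fold (ps : List Int) (x : List Int) :
    ps.foldl (fun inner p => inner.modify "open_ports" [] (fun l => l ++ [p]))
      (PySem.Dict.ofList [("open_ports", x)]) =
    PySem.Dict.ofList [("open_ports", x ++ ps)] := by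
  induction ps generalizing x with
  | nil => simp
  | cons p ps ih =>
      have step : (PySem.Dict.ofList [("open_ports", x)]).modify "open_ports" []
          (fun l => l ++ [p]) = PySem.Dict.ofList [("open_ports", x ++ [p])] := by
        rw [pvOfList_entry, pvOfList_entry]
        simp [PySem.Dict.modify, PySem.Dict.insert, PySem.Dict.getD, PySem.Dict.get?,
          PySem.Dict.contains]
      rw [List.foldl_cons, step, ih, List.append_assoc]
      rfl

theorem pvKeys_A (rs : List (String × Int)) :
    (pvFillA rs (pvInitA rs PySem.Dict.empty)).keys = PySem.List.dedup (rs.map (fun r => r.1)) := by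
  have hinit : (pvInitA rs PySem.Dict.empty).keys = PySem.Set.ofList (rs.map (fun r => r.1)) := by
    rw [pvInitA, PySem.Dict.keys_foldl_insert_key rs (fun r => r.1) (fun _ _ => pvEmptyEntry)]
    simp [PySem.Set.update_nil_left]
  rw [pvFillA, PySem.Dict.keys_foldl_modify_key rs (fun r => r.1) PySem.Dict.empty
      (fun _ r => fun inner => inner.modify "open_ports" [] (fun ps => ps ++ [r.2])), hinit,
    PySem.Set.update_eq_append_filter]
  rw [List.filter_eq_nil_iff.mpr ?nil]
  case nil =>
    intro y hy
    have hm : y ∈ rs.map (fun r => r.1) := (PySem.Set.mem_ofList _ _).mp hy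
    simp only [List.mem_map] at hm
    obtain ⟨r, hr, rfl⟩ := hm
    simp
    exact ⟨r.2, hr⟩
  simp [PySem.List.dedup_eq_ofList]

theorem pvNodup_A (rs : List (String × Int)) :
    (pvFillA rs (pvInitA rs PySem.Dict.empty)).keys.Nodup := by
  rw [pvKeys_A]; exact PySem.List.nodup_dedup _

theorem pvGroup_eq (rs : List (String × Int)) :
    pvItemsA (pvFillA rs (pvInitA rs PySem.Dict.empty)) = pvGroupB rs := by
  unfold pvItemsA pvGroupB
  rw [PySem.Dict.items_eq_map_keys _ (pvNodup_A rs) PySem.Dict.empty, pvKeys_A, List.map_map]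
  apply List.map_congr_left
  intro h hh
  have hmem : h ∈ rs.map (fun r => r.1) := (PySem.List.mem_dedup _ _).mp hh
  have hval : (pvFillA rs (pvInitA rs PySem.Dict.empty)).getD h PySem.Dict.empty =
      PySem.Dict.ofList [("open_ports", (rs.filter (fun r => r.1 == h)).map (fun r => r.2))] := by
    rw [pvFillA_getD, pvInitA_getD]
    simp only [hmem, if_true]
    have := pvEntry_fold ((rs.filter (fun r => r.1 == h)).map (fun r => r.2)) []
    simpa [pvEmptyEntry] using this
  simp only [Function.comp, hval]
  rfl

-- ===== VERDICT (by name: the statement is the Claim_ definition above) =====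
theorem build_dictionary_py_spec : Claim_equal_build_dictionary_py := by
  intro tcp udp _
  unfold Spec_build_dictionary_py build_dictionary_py build_dictionary_py_alt
  rw [pvGroup_eq, pvGroup_eq]
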